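-- pv_equiv track=rewrite | github.com/olsner/templisp | runlisp.py | parseInt
-- ===== SOURCE A (Python) =====
-- def parseInt(sexp):
--     n = 1
--     try:
--         while n < len(sexp):
--             int(sexp[n], 10)
--             n += 1
--     except:
--         pass
--
--     return int(sexp[:n]), sexp[n:]
-- ===== SOURCE B (Python) =====
-- def parseInt(sexp):
--     rest = sexp[1:]
--     n = 1 + len(rest) - len(rest.lstrip('0123456789'))
--     return int(sexp[:n]), sexp[n:]
-- ===== Notes on version B (the rewrite author's own statement) =====
-- stated objective: idiomatic
-- what changed: A probes each character after index 0 with int(c,10) inside a try/except while-loop advancing a manual index; B computes the split point in one expression by lstrip-ping the digit set from sexp[1:] and keeps the final int() conversion unguarded.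
-- outside the precondition, e.g. on parseInt(''): A raises ValueError, B raises ValueError; on parseInt('+'): A raises ValueError, B raises ValueError
import Mathlib
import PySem

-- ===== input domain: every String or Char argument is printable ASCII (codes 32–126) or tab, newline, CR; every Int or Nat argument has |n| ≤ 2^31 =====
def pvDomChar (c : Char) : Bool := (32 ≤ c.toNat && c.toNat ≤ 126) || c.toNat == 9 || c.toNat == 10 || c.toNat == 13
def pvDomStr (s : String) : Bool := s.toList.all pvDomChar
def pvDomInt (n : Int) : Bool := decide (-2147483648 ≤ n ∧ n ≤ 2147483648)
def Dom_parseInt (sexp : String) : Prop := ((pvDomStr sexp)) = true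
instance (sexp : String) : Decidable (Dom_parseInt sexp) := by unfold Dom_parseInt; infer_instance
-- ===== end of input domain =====

-- B replaces A's per-character int() probe loop with one lstrip of the digit set; objective: idiomatic, same cost.

-- ===== PORT A =====
-- the try/while loop: advance n while sexp[n] exists and int(sexp[n], 10) succeeds (on ASCII input: a decimal digit)
def parseIntScan (l : List Char) (n : Nat) : Nat :=
  if h : n < l.length then
    if (l[n]).isDigit then parseIntScan l (n + 1) else n
  else n
termination_by l.length - n

def parseInt (sexp : String) : Int × String :=
  let l := sexp.toList
  let n := parseIntScan l 1
  ((PySem.Int.ofChars? (l.take n)).getD 0, String.ofList (l.drop n))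

-- ===== PORT B =====
-- rest.lstrip('0123456789'): drop leading chars belonging to the digit set (exact port of str.lstrip(chars))
def parseInt_alt (sexp : String) : Int × String :=
  let l := sexp.toList
  let rest := l.drop 1
  let n := 1 + (rest.length - (rest.dropWhile (fun c => ("0123456789".toList).contains c)).length)
  ((PySem.Int.ofChars? (l.take n)).getD 0, String.ofList (l.drop n))

-- ===== PRECONDITION & SPEC =====
-- Pre_ excludes exactly the inputs where Python's final int(sexp[:n]) raises ValueError: the scanned
-- prefix is first char + digit run, and int accepts it iff the first char is a digit, or is a
-- sign/whitespace character followed by at least one digit.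
def Pre_parseInt (sexp : String) : Prop :=
  sexp.toList ≠ [] ∧
    ((sexp.toList.getD 0 ' ').isDigit = true ∨
      ((sexp.toList.getD 0 ' ') ∈ ['+', '-', ' ', '\t', '\n', '\r'] ∧
        (sexp.toList.getD 1 ' ').isDigit = true))
instance (sexp : String) : Decidable (Pre_parseInt sexp) := by unfold Pre_parseInt; infer_instance

def pvWitness_parseInt : String := "123)"

def Spec_parseInt (sexp : String) (out : Int × String) : Prop := out = parseInt_alt sexp
instance (sexp : String) (out : Int × String) : Decidable (Spec_parseInt sexp out) := by unfold Spec_parseInt; infer_instance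

-- ===== CLAIM (what is proved, stated in full; the proofs are below) =====
def Claim_equal_parseInt : Prop := ∀ (sexp : String), Dom_parseInt sexp → Pre_parseInt sexp → Spec_parseInt sexp (parseInt sexp)

-- ===== LEMMAS AND PROOFS =====

-- membership in B's literal digit set coincides with Char.isDigit
theorem mem_digits_iff_isDigit (c : Char) :
    (("0123456789".toList).contains c) = c.isDigit := by
  rw [Bool.eq_iff_iff]
  simp only [show "0123456789".toList = ['0','1','2','3','4','5','6','7','8','9'] from rfl,
    List.contains_eq_mem, List.mem_cons, List.not_mem_nil, or_false, decide_eq_true_eq,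
    Char.isDigit, Bool.and_eq_true, UInt32.le_iff_toNat_le, Char.ext_iff, UInt32.ext_iff]
  have : '0'.val.toNat = 48 := rfl
  have : '1'.val.toNat = 49 := rfl
  have : '2'.val.toNat = 50 := rfl
  have : '3'.val.toNat = 51 := rfl
  have : '4'.val.toNat = 52 := rfl
  have : '5'.val.toNat = 53 := rfl
  have : '6'.val.toNat = 54 := rfl
  have : '7'.val.toNat = 55 := rfl
  have : '8'.val.toNat = 56 := rfl
  have : '9'.val.toNat = 57 := rfl
  omega

-- characterisation of A's scan loop: it stops after the leading digit run beyond index n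
theorem parseIntScan_eq (l : List Char) (n : Nat) :
    parseIntScan l n = n + (List.takeWhile Char.isDigit (l.drop n)).length := by
  by_cases h : n < l.length
  · rw [parseIntScan, dif_pos h]
    have hd : l.drop n = l[n] :: l.drop (n + 1) := List.drop_eq_getElem_cons h
    by_cases hdig : (l[n]).isDigit
    · rw [if_pos hdig, parseIntScan_eq l (n + 1), hd, List.takeWhile_cons, hdig]
      simp only [if_true, List.length_cons]
      omega
    · rw [if_neg hdig, hd, List.takeWhile_cons]
      simp [hdig]
  · rw [parseIntScan, dif_neg h, List.drop_eq_nil_of_le (by omega)]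
    simp
termination_by l.length - n

-- A's scan index equals B's lstrip-length formula
theorem scan_eq_alt (l : List Char) :
    parseIntScan l 1 =
      1 + ((l.drop 1).length -
        ((l.drop 1).dropWhile (fun c => ("0123456789".toList).contains c)).length) := by
  rw [parseIntScan_eq]
  have hfun : (fun c => ("0123456789".toList).contains c) = Char.isDigit := by
    funext c; exact mem_digits_iff_isDigit c
  rw [hfun]
  have h := List.takeWhile_append_dropWhile (p := Char.isDigit) (l := l.drop 1)
  have hlen : (l.drop 1).length =
      (List.takeWhile Char.isDigit (l.drop 1)).length +
      (List.dropWhile Char.isDigit (l.drop 1)).length := by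
    conv_lhs => rw [← h]
    rw [List.length_append]
  omega

-- ===== VERDICT (by name: the statement is the Claim_ definition above) =====
theorem parseInt_spec : Claim_equal_parseInt := by
  intro sexp _ _
  unfold Spec_parseInt
  simp only [parseInt, parseInt_alt, scan_eq_alt]
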